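-- pv_equiv track=rewrite | github.com/Farboud/WonderDam | formula.py | sort_by_month
-- ===== SOURCE A (Python) =====
-- def sort_by_month(in_list):
-- #keeps the values of each month in a seperate list
-- 	out=[]*12
-- 	for month in range(0,12):
-- 		out_month=[]
-- 		for i in range(month,len(in_list),12):
-- 			out_month.append(in_list[i])
-- 		out.append(out_month)
-- 	return out
-- ===== SOURCE B (Python) =====
-- def sort_by_month(in_list):
--     # single forward pass: scatter each element into bucket i % 12
--     out = [[] for _ in range(12)]
--     for i, v in enumerate(in_list):
--         out[i % 12].append(v)
--     return out
-- ===== Notes on version B (the rewrite author's own statement) =====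
-- stated objective: alternative
-- what changed: Replaces A's month-outer loop with a stride-12 inner index scan (collect) by one sequential enumerate pass that scatters each element into bucket i % 12.
import Mathlib
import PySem

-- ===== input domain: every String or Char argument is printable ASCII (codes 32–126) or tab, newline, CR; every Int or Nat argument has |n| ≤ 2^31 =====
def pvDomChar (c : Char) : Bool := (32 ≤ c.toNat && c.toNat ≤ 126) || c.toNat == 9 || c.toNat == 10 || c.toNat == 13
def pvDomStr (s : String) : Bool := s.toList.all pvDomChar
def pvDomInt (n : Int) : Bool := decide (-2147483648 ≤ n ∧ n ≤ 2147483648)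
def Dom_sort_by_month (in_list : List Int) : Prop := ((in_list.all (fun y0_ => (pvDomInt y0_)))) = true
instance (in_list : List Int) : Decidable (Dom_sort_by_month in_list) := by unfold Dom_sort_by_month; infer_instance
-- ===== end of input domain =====

-- B replaces A's month-outer / stride-12 inner collection with one sequential scatter pass by i % 12 (alternative decomposition, same cost).


-- ===== PORT A =====
-- for month in range(0,12): out_month = [in_list[i] for i in range(month, len, 12)]; out.append(out_month)
def sort_by_month (in_list : List Int) : List (List Int) :=
  (PySem.List.pyRange 0 12 1).foldl
    (fun out month =>
      out ++ [(PySem.List.pyRange month (in_list.length : Int) 12).foldl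
        (fun out_month i => out_month ++ [PySem.List.pyGetD in_list i 0]) []])
    []

-- ===== PORT B =====
-- out = [[] for _ in range(12)]; for i, v in enumerate(in_list): out[i % 12].append(v)
def sort_by_month_alt (in_list : List Int) : List (List Int) :=
  (PySem.List.enumerate in_list 0).foldl
    (fun out p =>
      PySem.List.pySetD out (PySem.Int.mod p.1 12)
        (PySem.List.pyGetD out (PySem.Int.mod p.1 12) [] ++ [p.2]))
    (List.replicate 12 [])

-- ===== PRECONDITION & SPEC =====
def Spec_sort_by_month (in_list : List Int) (out : List (List Int)) : Prop := out = sort_by_month_alt in_list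
instance (in_list : List Int) (out : List (List Int)) : Decidable (Spec_sort_by_month in_list out) := by unfold Spec_sort_by_month; infer_instance

-- ===== CLAIM (what is proved, stated in full; the proofs are below) =====
def Claim_equal_sort_by_month : Prop := ∀ (in_list : List Int), Dom_sort_by_month in_list → Spec_sort_by_month in_list (sort_by_month in_list)

-- ===== LEMMAS AND PROOFS =====

-- proof-side selector: skip c elements, take one, then repeat with period 12
def pvPick (c : Nat) : List Int → List Int
  | [] => []
  | x :: t => if c = 0 then x :: pvPick 11 t else pvPick (c - 1) t

-- step-12 range shifts by one
lemma pvRange12_shift (a b : Int) :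
    PySem.List.pyRange (a + 1) (b + 1) 12 = (PySem.List.pyRange a b 12).map (· + 1) := by
  rw [PySem.List.pyRange_of_pos _ _ (by norm_num : (0:Int) < 12),
      PySem.List.pyRange_of_pos _ _ (by norm_num : (0:Int) < 12), List.map_map]
  have h1 : b + 1 - (a + 1) + 12 - 1 = b - a + 12 - 1 := by ring
  have h2 : (a + 1 < b + 1) ↔ (a < b) := by omega
  simp only [h1, h2]
  exact List.map_congr_left (fun k _ => by simp [Function.comp]; ring)

-- step-12 range unfolds one element at the front
lemma pvRange12_cons (a b : Int) (h : a < b) :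
    PySem.List.pyRange a b 12 = a :: PySem.List.pyRange (a + 12) b 12 := by
  rw [PySem.List.pyRange_of_pos _ _ (by norm_num : (0:Int) < 12),
      PySem.List.pyRange_of_pos _ _ (by norm_num : (0:Int) < 12)]
  by_cases h2 : a + 12 < b
  · have hN : (if a < b then ((b - a + 12 - 1) / 12).toNat else 0)
        = (if a + 12 < b then ((b - (a + 12) + 12 - 1) / 12).toNat else 0) + 1 := by
      simp only [if_pos h, if_pos h2]
      omega
    rw [hN, List.range_succ_eq_map, List.map_cons, List.map_map]
    refine congrArg₂ _ (by ring) ?_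
    exact List.map_congr_left (fun k _ => by simp [Function.comp]; ring)
  · have hN : (if a < b then ((b - a + 12 - 1) / 12).toNat else 0) = 1 := by
      simp only [if_pos h]; omega
    have hN' : (if a + 12 < b then ((b - (a + 12) + 12 - 1) / 12).toNat else 0) = 0 := by
      simp only [if_neg h2]
    rw [hN, hN']
    simp

-- indexing shifts across a cons for nonnegative indices
lemma pvGetD_cons_shift (x : Int) (t : List Int) (i : Int) (hi : 0 ≤ i) :
    PySem.List.pyGetD (x :: t) (i + 1) 0 = PySem.List.pyGetD t i 0 := by
  obtain ⟨n, rfl⟩ : ∃ n : Nat, i = (n : Int) := ⟨i.toNat, (Int.toNat_of_nonneg hi).symm⟩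
  have h1 : (n : Int) + 1 = ((n + 1 : Nat) : Int) := by push_cast; ring
  rw [h1, PySem.List.pyGetD_natCast, PySem.List.pyGetD_natCast]
  simp

-- A's stride-12 collection equals the skip-take selector
lemma pvStride_eq_pick (xs : List Int) : ∀ (m : Nat),
    (PySem.List.pyRange (m : Int) (xs.length : Int) 12).map (fun i => PySem.List.pyGetD xs i 0)
      = pvPick m xs := by
  induction xs with
  | nil =>
      intro m
      rw [PySem.List.pyRange_of_pos _ _ (by norm_num : (0:Int) < 12)]
      simp [pvPick]
  | cons x t ih =>
      intro m
      have hlen : ((x :: t).length : Int) = (t.length : Int) + 1 := by simp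
      match m with
      | 0 =>
          simp only [Nat.cast_zero]
          rw [hlen, pvRange12_cons 0 ((t.length : Int) + 1) (by omega), List.map_cons]
          have hsh : PySem.List.pyRange (0 + 12) ((t.length : Int) + 1) 12
              = (PySem.List.pyRange 11 (t.length : Int) 12).map (· + 1) := by
            have := pvRange12_shift 11 (t.length : Int)
            simpa using this
          rw [hsh, List.map_map]
          have htail : (PySem.List.pyRange 11 (t.length : Int) 12).map
                ((fun i => PySem.List.pyGetD (x :: t) i 0) ∘ (· + 1))
              = (PySem.List.pyRange 11 (t.length : Int) 12).map
                (fun i => PySem.List.pyGetD t i 0) := by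
            refine List.map_congr_left (fun i hi => ?_)
            have hmem := (PySem.List.mem_pyRange_iff_of_pos (by norm_num : (0:Int) < 12) i).mp hi
            exact pvGetD_cons_shift x t i (by omega)
          rw [htail]
          have h11 : ((11 : Nat) : Int) = (11 : Int) := by norm_num
          rw [← h11, ih 11]
          simp [pvPick, PySem.List.pyGetD_zero_cons]
      | Nat.succ k =>
          rw [hlen]
          have hcast : ((k + 1 : Nat) : Int) = (k : Int) + 1 := by push_cast; ring
          rw [hcast, pvRange12_shift (k : Int) (t.length : Int), List.map_map]
          have htail : (PySem.List.pyRange (k : Int) (t.length : Int) 12).map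
                ((fun i => PySem.List.pyGetD (x :: t) i 0) ∘ (· + 1))
              = (PySem.List.pyRange (k : Int) (t.length : Int) 12).map
                (fun i => PySem.List.pyGetD t i 0) := by
            refine List.map_congr_left (fun i hi => ?_)
            have hmem := (PySem.List.mem_pyRange_iff_of_pos (by norm_num : (0:Int) < 12) i).mp hi
            exact pvGetD_cons_shift x t i (by omega)
          rw [htail, ih k]
          simp [pvPick]

-- B's scatter loop keeps twelve buckets
lemma pvScatter_length : ∀ (xs : List Int) (s : Int) (out : List (List Int)),
    ((PySem.List.enumerate xs s).foldl
      (fun out p =>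
        PySem.List.pySetD out (PySem.Int.mod p.1 12)
          (PySem.List.pyGetD out (PySem.Int.mod p.1 12) [] ++ [p.2])) out).length = out.length := by
  intro xs
  induction xs with
  | nil => intro s out; simp [PySem.List.enumerate]
  | cons x t ih =>
      intro s out
      rw [PySem.List.enumerate_cons, List.foldl_cons, ih]
      simp [PySem.List.length_pySetD]

-- B's scatter loop, bucket by bucket: bucket m collects exactly the skip-take selection
lemma pvScatter_getD (m : Nat) (hm : m < 12) : ∀ (xs : List Int) (s : Int), 0 ≤ s →
    ∀ (out : List (List Int)), out.length = 12 →
    ((PySem.List.enumerate xs s).foldl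
      (fun out p =>
        PySem.List.pySetD out (PySem.Int.mod p.1 12)
          (PySem.List.pyGetD out (PySem.Int.mod p.1 12) [] ++ [p.2])) out).getD m []
    = out.getD m [] ++ pvPick ((((m : Int) - s) % 12).toNat) xs := by
  intro xs
  induction xs with
  | nil => intro s _ out _; simp [PySem.List.enumerate, pvPick]
  | cons x t ih =>
      intro s hs out hlen
      rw [PySem.List.enumerate_cons, List.foldl_cons]
      have hmod : PySem.Int.mod s 12 = s % 12 := PySem.Int.mod_eq_emod_of_pos (by norm_num)
      have hjlt : s % 12 < (12 : Int) := Int.emod_lt_of_pos s (by norm_num)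
      have hjge : (0 : Int) ≤ s % 12 := Int.emod_nonneg s (by norm_num)
      have hget : PySem.List.pyGetD out (PySem.Int.mod s 12) [] = out[(s % 12).toNat]'(by omega) := by
        rw [hmod]
        exact PySem.List.pyGetD_eq_getElem out [] hjge (by omega)
      have hset : PySem.List.pySetD out (PySem.Int.mod s 12)
            (PySem.List.pyGetD out (PySem.Int.mod s 12) [] ++ [x])
          = out.set (s % 12).toNat (out[(s % 12).toNat]'(by omega) ++ [x]) := by
        rw [hget, hmod, PySem.List.pySetD_of_nonneg out _ hjge]
      simp only [hset]
      rw [ih (s + 1) (by omega) _ (by simp [hlen])]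
      by_cases hcase : (s % 12).toNat = m
      · have hc0 : (((m : Int) - s) % 12).toNat = 0 := by omega
        have hc1 : (((m : Int) - (s + 1)) % 12).toNat = 11 := by omega
        rw [hc0, hc1]
        have hsetget : (out.set (s % 12).toNat (out[(s % 12).toNat]'(by omega) ++ [x])).getD m []
            = out.getD m [] ++ [x] := by
          rw [List.getD_eq_getElem _ _ (by simp; omega), List.getD_eq_getElem _ _ (by omega)]
          simp [hcase]
        rw [hsetget]
        simp [pvPick]
      · have hcne : (((m : Int) - s) % 12).toNat ≠ 0 := by omega
        have hc1 : (((m : Int) - (s + 1)) % 12).toNat = (((m : Int) - s) % 12).toNat - 1 := by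
          omega
        rw [hc1]
        have hsetget : (out.set (s % 12).toNat (out[(s % 12).toNat]'(by omega) ++ [x])).getD m []
            = out.getD m [] := by
          rw [List.getD_eq_getElem _ _ (by simp; omega), List.getElem_set_ne (by omega),
              List.getD_eq_getElem _ _ (by omega)]
        rw [hsetget]
        cases hp : pvPick (((m : Int) - s) % 12).toNat (x :: t) with
        | nil => simp [pvPick, hcne] at hp ⊢; rw [← hp]
        | cons y ys => simp [pvPick, hcne] at hp ⊢; rw [← hp]

-- ===== VERDICT (by name: the statement is the Claim_ definition above) =====
theorem sort_by_month_spec : Claim_equal_sort_by_month := by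
  intro xs _
  unfold Spec_sort_by_month sort_by_month sort_by_month_alt
  rw [PySem.List.foldl_append_singleton_eq_map]
  apply List.ext_getElem
  · rw [pvScatter_length]
    simp [PySem.List.length_pyRange_one]
  · intro i hA hB
    have hi : i < 12 := by
      simpa [PySem.List.length_pyRange_one] using hA
    have hBlen : ((PySem.List.enumerate xs 0).foldl
        (fun out p =>
          PySem.List.pySetD out (PySem.Int.mod p.1 12)
            (PySem.List.pyGetD out (PySem.Int.mod p.1 12) [] ++ [p.2]))
        (List.replicate 12 ([] : List Int))).length = 12 := by
      rw [pvScatter_length]; simp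
    simp only [List.nil_append]
    rw [List.getElem_map, PySem.List.getElem_pyRange_one]
    have hAi : (0 : Int) + ((i : Nat) : Int) = ((i : Nat) : Int) := by ring
    rw [hAi]
    have hA' := pvStride_eq_pick xs i
    rw [show ((PySem.List.pyRange (i : Int) (xs.length : Int) 12).foldl
          (fun out_month j => out_month ++ [PySem.List.pyGetD xs j 0]) [])
        = (PySem.List.pyRange (i : Int) (xs.length : Int) 12).map
            (fun j => PySem.List.pyGetD xs j 0) from by
      rw [PySem.List.foldl_append_singleton_eq_map _ _ [], List.nil_append], hA']
    rw [← List.getD_eq_getElem _ ([] : List Int) hB]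
    rw [pvScatter_getD i hi xs 0 le_rfl _ (by simp)]
    have : ((((i : Nat) : Int) - 0) % 12).toNat = i := by omega
    rw [this, List.getD_replicate _ hi, List.nil_append]
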